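-- pv_equiv track=rewrite | github.com/minzoovv/malangmalang-brain | algorithmbook/kakao6.py | solution
-- ===== SOURCE A (Python) =====
-- from itertools import permutations
--
-- def check_fixable(n, members, weak):
--     for i in range(len(weak)):
--         linear_dist = get_linear_dist(n, weak, i)
--         for member in members:
--             coverage = linear_dist[0] + member
--             # can cover all
--             if coverage >= linear_dist[len(linear_dist)-1]:
--                 linear_dist = []
--                 break
--
--             else:
--                 for j in range(len(linear_dist)):
--                     if coverage < linear_dist[j]:
--                         linear_dist = linear_dist[j:]
--                         break
--
--         if not linear_dist:
--             return True
--
--     return False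
--
-- def get_linear_dist(n, weak, start_idx):
--     linear_dist = []
--     for i in range(start_idx, len(weak)):
--         linear_dist.append(weak[i])
--
--     for i in range(0, start_idx):
--         linear_dist.append(weak[i] + n)
--
--     return linear_dist
--
-- def solution(n, weak, dist):
--     answer = -1
--     dist.sort(reverse=True)
--     for i in range(0, len(dist)):
--         members_p = list(permutations(dist[0:i+1]))
--         for members in members_p:
--             members = list(members)
--
--             if check_fixable(n, members, weak):
--                 answer = len(members)
--                 return answer
--
--     return answer
-- ===== SOURCE B (Python) =====
-- def solution(n, weak, dist):
--     # Backtracking DFS over the remaining (unused) friends with early success,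
--     # trying friend-counts k = 1.. incrementally, instead of materializing every
--     # permutation of each prefix.  Does not mutate dist (A sorts it in place).
--     ds = sorted(dist, reverse=True)
--     for k in range(1, len(ds) + 1):
--         for i in range(len(weak)):
--             ld = weak[i:] + [w + n for w in weak[:i]]
--             if _dfs(ds[:k], ld):
--                 return k
--     return -1
--
--
-- def _dfs(avail, ld):
--     # can some ordering of the friends in avail (placed one after the other at
--     # the first still-uncovered weak point) cover the rest of ld?
--     for t in range(len(avail)):
--         cov = ld[0] + avail[t]
--         if cov >= ld[len(ld) - 1]:
--             return True
--         j = 0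
--         while cov >= ld[j]:
--             j += 1
--         if _dfs(avail[:t] + avail[t + 1:], ld[j:]):
--             return True
--     return False
-- ===== Notes on version B (the rewrite author's own statement) =====
-- stated objective: alternative
-- what changed: A materializes the full list of permutations of every sorted prefix and re-runs the whole cover check on each; B does a backtracking DFS over the remaining (unused) friends with early success per start, trying friend-counts k = 1.. incrementally, so shared orderings are pruned as soon as a cover is found.
import Mathlib
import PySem

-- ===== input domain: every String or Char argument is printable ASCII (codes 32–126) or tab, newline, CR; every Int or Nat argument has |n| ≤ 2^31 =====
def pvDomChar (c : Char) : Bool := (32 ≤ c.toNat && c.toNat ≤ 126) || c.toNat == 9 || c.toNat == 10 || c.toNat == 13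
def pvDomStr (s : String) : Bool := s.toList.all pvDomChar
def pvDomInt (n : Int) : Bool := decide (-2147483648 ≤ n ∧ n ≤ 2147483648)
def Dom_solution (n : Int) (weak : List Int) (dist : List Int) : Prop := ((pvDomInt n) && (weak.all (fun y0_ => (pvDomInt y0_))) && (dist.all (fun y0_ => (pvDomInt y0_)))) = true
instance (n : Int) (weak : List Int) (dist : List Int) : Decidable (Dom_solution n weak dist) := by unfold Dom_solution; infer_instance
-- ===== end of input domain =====

-- B replaces A's materialized permutation lists (itertools.permutations of every
-- sorted prefix) by a backtracking DFS over the remaining friends with early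
-- success; equivalence is about the RETURN value only (A sorts dist in place, B does not mutate it).

-- ===== PORT A =====

-- inner 'for j in range(len(linear_dist)): if coverage < linear_dist[j]: linear_dist = linear_dist[j:]; break'
def stepA (cov : Int) (ld : List Int) : List Int :=
  match ld.findIdx? (fun x => decide (cov < x)) with
  | some j => ld.drop j
  | none => ld

-- the 'for member in members' loop of check_fixable; [] encodes the covered break.
-- ld is nonempty at every indexing here (Python would raise IndexError on []).
def procA (members ld : List Int) : List Int :=
  match members with
  | [] => ld
  | mem :: ms =>
    let cov := ld.getD 0 0 + mem
    if ld.getD (ld.length - 1) 0 ≤ cov then []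
    else procA ms (stepA cov ld)

-- get_linear_dist: append weak[i] for i in range(start, len), then weak[i]+n for i in range(0, start)
def linDistA (n : Int) (weak : List Int) (start : Nat) : List Int :=
  (List.range' start (weak.length - start)).map (fun j => weak.getD j 0) ++
  (List.range start).map (fun j => weak.getD j 0 + n)

-- check_fixable: some start index leaves linear_dist empty
def checkFixA (n : Int) (members weak : List Int) : Bool :=
  (List.range weak.length).any (fun i => (procA members (linDistA n weak i)).isEmpty)

-- 'for i in range(0, len(dist)): for members in permutations(dist[0:i+1]): if fixable: return len(members)'
def aLoopA (n : Int) (weak ds : List Int) (i : Nat) : Int :=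
  if _h : i < ds.length then
    match (PySem.List.permutations (ds.take (i+1)) (ds.take (i+1)).length).find?
            (fun ms => checkFixA n ms weak) with
    | some ms => PySem.List.len ms
    | none => aLoopA n weak ds (i+1)
  else -1
termination_by ds.length - i

def solution (n : Int) (weak : List Int) (dist : List Int) : Int :=
  aLoopA n weak (PySem.List.sorted dist (fun x => x) true) 0

-- ===== PORT B =====

-- 'j = 0; while cov >= ld[j]: j += 1' (the bound j < length only makes the loop total;
-- Python reaches it only when an element exceeding cov exists ahead)
def advIdxB (cov : Int) (ld : List Int) (j : Nat) : Nat :=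
  if _h : j < ld.length then
    if ld.getD j 0 ≤ cov then advIdxB cov ld (j+1) else j
  else j
termination_by ld.length - j

-- _dfs of Source B; the extra parameter t is the 'for t in range(len(avail))' counter
def dfsB (avail ld : List Int) (t : Nat) : Bool :=
  if h : t < avail.length then
    let cov := ld.getD 0 0 + avail.getD t 0
    if ld.getD (ld.length - 1) 0 ≤ cov then true
    else if dfsB (avail.take t ++ avail.drop (t+1)) (ld.drop (advIdxB cov ld 0)) 0 then true
    else dfsB avail ld (t+1)
  else false
termination_by (avail.length, avail.length - t)
decreasing_by
  · left
    simp only [List.length_append, List.length_take, List.length_drop]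
    omega
  · exact Prod.Lex.right _ (by omega)

-- ld = weak[i:] + [w + n for w in weak[:i]]
def ldB (n : Int) (weak : List Int) (i : Nat) : List Int :=
  PySem.List.slice weak (some (i : Int)) none ++
  (PySem.List.slice weak none (some (i : Int))).map (fun w => w + n)

-- 'for k in range(1, len(ds)+1): for i in range(len(weak)): if _dfs(ds[:k], ld): return k'
def bLoopB (n : Int) (weak ds : List Int) (k : Nat) : Int :=
  if _h : k ≤ ds.length then
    if (List.range weak.length).any (fun i => dfsB (ds.take k) (ldB n weak i) 0) then (k : Int)
    else bLoopB n weak ds (k+1)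
  else -1
termination_by ds.length + 1 - k

def solution_alt (n : Int) (weak : List Int) (dist : List Int) : Int :=
  bLoopB n weak (PySem.List.sorted dist (fun x => x) true) 1

-- ===== PRECONDITION & SPEC =====
def Spec_solution (n : Int) (weak : List Int) (dist : List Int) (out : Int) : Prop := out = solution_alt n weak dist
instance (n : Int) (weak : List Int) (dist : List Int) (out : Int) : Decidable (Spec_solution n weak dist out) := by unfold Spec_solution; infer_instance

-- ===== CLAIM (what is proved, stated in full; the proofs are below) =====
def Claim_equal_solution : Prop := ∀ (n : Int) (weak : List Int) (dist : List Int), Dom_solution n weak dist → Spec_solution n weak dist (solution n weak dist)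

-- ===== LEMMAS AND PROOFS =====

-- the normalized advance step both inner loops compute: drop the covered prefix
def dropCov (cov : Int) (ld : List Int) : List Int := ld.dropWhile (fun x => decide (x ≤ cov))

lemma dropWhile_eq_drop_len_takeWhile (p : Int → Bool) (l : List Int) :
    l.dropWhile p = l.drop (l.takeWhile p).length := by
  induction l with
  | nil => rfl
  | cons x xs ih => by_cases h : p x <;> simp [h, ih]

lemma advIdxB_eq (cov : Int) (ld : List Int) : ∀ j, j ≤ ld.length →
    advIdxB cov ld j = j + ((ld.drop j).takeWhile (fun x => decide (x ≤ cov))).length := by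
  intro j hj
  induction hn : ld.length - j generalizing j with
  | zero =>
    have hj' : j = ld.length := by omega
    rw [advIdxB]
    simp [hj']
  | succ c ih =>
    have hjl : j < ld.length := by omega
    have hdrop : ld.drop j = ld[j] :: ld.drop (j+1) := (List.getElem_cons_drop hjl).symm
    rw [advIdxB]
    rw [dif_pos hjl, List.getD_eq_getElem ld 0 hjl]
    by_cases hc : ld[j] ≤ cov
    · rw [if_pos hc, ih (j+1) (by omega) (by omega), hdrop, List.takeWhile_cons]
      simp [hc]
      omega
    · rw [if_neg hc, hdrop]
      simp [hc]

lemma drop_advIdxB (cov : Int) (ld : List Int) :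
    ld.drop (advIdxB cov ld 0) = dropCov cov ld := by
  rw [advIdxB_eq cov ld 0 (Nat.zero_le _)]
  simp [dropCov, dropWhile_eq_drop_len_takeWhile]

lemma stepA_eq (cov : Int) (ld : List Int) (h : ∃ x ∈ ld, cov < x) :
    stepA cov ld = dropCov cov ld := by
  induction ld with
  | nil => simp at h
  | cons x xs ih =>
    by_cases hx : cov < x
    · rw [stepA, List.findIdx?_cons]
      simp [hx, dropCov, not_le.mpr hx]
    · have hxs : ∃ y ∈ xs, cov < y := by
        rcases h with ⟨y, hy, hcy⟩
        rcases List.mem_cons.mp hy with rfl | hy'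
        · exact absurd hcy hx
        · exact ⟨y, hy', hcy⟩
      have hstep : stepA cov (x :: xs) = stepA cov xs := by
        rw [stepA, stepA, List.findIdx?_cons]
        simp only [hx, decide_false, Bool.false_eq_true, if_false]
        cases hfind : List.findIdx? (fun y => decide (cov < y)) xs with
        | none =>
          exfalso
          rcases hxs with ⟨y, hy, hcy⟩
          have := List.findIdx?_eq_none_iff.mp hfind y hy
          simp [hcy] at this
        | some j => simp
      rw [hstep, ih hxs]
      simp [dropCov, not_lt.mp hx]

lemma dropCov_ne_nil (cov : Int) (ld : List Int) (h : ld ≠ [])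
    (hlast : cov < ld.getLast h) : dropCov cov ld ≠ [] := by
  simp only [dropCov, ne_eq, List.dropWhile_eq_nil_iff]
  intro hall
  have := hall (ld.getLast h) (List.getLast_mem h)
  simp [not_le.mpr hlast] at this

lemma dropCov_getLast? (cov : Int) (ld : List Int) (h : ld ≠ [])
    (hlast : cov < ld.getLast h) : (dropCov cov ld).getLast? = ld.getLast? := by
  induction ld with
  | nil => exact absurd rfl h
  | cons x xs ih =>
    by_cases hxs : xs = []
    · subst hxs
      simp only [List.getLast_singleton] at hlast
      simp [dropCov, not_le.mpr hlast]
    · by_cases hx : x ≤ cov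
      · have hd : dropCov cov (x :: xs) = dropCov cov xs := by simp [dropCov, hx]
        have hlast' : cov < xs.getLast hxs := by
          rw [← List.getLast_cons (h := hxs)]
          exact hlast
        rw [hd, ih hxs hlast']
        rw [List.getLast?_eq_some_getLast hxs,
            List.getLast?_eq_some_getLast (List.cons_ne_nil x xs),
            List.getLast_cons hxs]
      · simp [dropCov, hx]

lemma dropCov_getLast (cov : Int) (ld : List Int) (h : ld ≠ [])
    (hlast : cov < ld.getLast h) (h2 : dropCov cov ld ≠ []) :
    (dropCov cov ld).getLast h2 = ld.getLast h := by
  have := dropCov_getLast? cov ld h hlast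
  rw [List.getLast?_eq_some_getLast h2, List.getLast?_eq_some_getLast h] at this
  exact Option.some.inj this

lemma getD_last_eq (ld : List Int) (h : ld ≠ []) :
    ld.getD (ld.length - 1) 0 = ld.getLast h := by
  rw [List.getLast_eq_getElem, List.getD_eq_getElem]

lemma dfsB_true_iff (avail ld : List Int) : ∀ t, (dfsB avail ld t = true ↔
    ∃ t', t ≤ t' ∧ t' < avail.length ∧
      (ld.getD (ld.length - 1) 0 ≤ ld.getD 0 0 + avail.getD t' 0 ∨
       dfsB (avail.take t' ++ avail.drop (t'+1))
            (ld.drop (advIdxB (ld.getD 0 0 + avail.getD t' 0) ld 0)) 0 = true)) := by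
  intro t
  induction hn : avail.length - t generalizing t with
  | zero =>
    have ht : ¬ t < avail.length := by omega
    rw [dfsB, dif_neg ht]
    constructor
    · intro hh; exact absurd hh (by simp)
    · rintro ⟨t', h1, h2, _⟩; omega
  | succ c ih =>
    have ht : t < avail.length := by omega
    rw [dfsB, dif_pos ht]
    simp only []
    by_cases hcov : ld.getD (ld.length - 1) 0 ≤ ld.getD 0 0 + avail.getD t 0
    · rw [if_pos hcov]
      constructor
      · intro _; exact ⟨t, le_refl t, ht, Or.inl hcov⟩
      · intro _; trivial
    · rw [if_neg hcov]
      by_cases hrec : dfsB (avail.take t ++ avail.drop (t+1))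
          (ld.drop (advIdxB (ld.getD 0 0 + avail.getD t 0) ld 0)) 0 = true
      · simp only [hrec, if_true]
        constructor
        · intro _; exact ⟨t, le_refl t, ht, Or.inr hrec⟩
        · intro _; trivial
      · simp only [hrec, Bool.false_eq_true, if_false]
        rw [ih (t+1) (by omega)]
        constructor
        · rintro ⟨t', h1, h2, h3⟩; exact ⟨t', by omega, h2, h3⟩
        · rintro ⟨t', h1, h2, h3⟩
          rcases Nat.eq_or_lt_of_le h1 with rfl | hlt
          · rcases h3 with h3 | h3
            · exact absurd h3 hcov
            · exact absurd h3 hrec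
          · exact ⟨t', by omega, h2, h3⟩

lemma exists_mem_permutations : ∀ (r : Nat) (ys : List Int), ys.length = r →
    ∃ p, p ∈ PySem.List.permutations ys r := by
  intro r
  induction r with
  | zero => intro ys _; exact ⟨[], by simp [PySem.List.permutations_zero]⟩
  | succ r ih =>
    intro ys hy
    cases ys with
    | nil => simp at hy
    | cons y t =>
      have ht : t.length = r := by simpa using hy
      obtain ⟨p, hp⟩ := ih t ht
      refine ⟨y :: p, ?_⟩
      rw [PySem.List.permutations_succ]
      apply List.mem_flatMap.mpr
      refine ⟨0, by simp, ?_⟩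
      simp only [List.getElem?_cons_zero, List.eraseIdx_cons_zero]
      exact List.mem_map.mpr ⟨p, hp, rfl⟩

lemma dfsB_iff_perm (r : Nat) : ∀ (avail ld : List Int), avail.length = r → ld ≠ [] →
    (dfsB avail ld 0 = true ↔
      ∃ ms ∈ PySem.List.permutations avail r, procA ms ld = []) := by
  induction r with
  | zero =>
    intro avail ld h0 hld
    have hav : avail = [] := List.length_eq_zero_iff.mp h0
    subst hav
    rw [dfsB]
    simp [PySem.List.permutations_zero, procA, hld]
  | succ r ih =>
    intro avail ld hlen hld
    rw [dfsB_true_iff avail ld 0]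
    constructor
    · rintro ⟨t', -, ht', hbody⟩
      have hgetD : avail.getD t' 0 = avail[t'] := List.getD_eq_getElem avail 0 ht'
      have hmemof : ∀ p', p' ∈ PySem.List.permutations (avail.eraseIdx t') r →
          avail[t'] :: p' ∈ PySem.List.permutations avail (r+1) := by
        intro p' hp'
        rw [PySem.List.permutations_succ]
        apply List.mem_flatMap.mpr
        refine ⟨t', List.mem_range.mpr ht', ?_⟩
        rw [List.getElem?_eq_getElem ht']
        exact List.mem_map.mpr ⟨p', hp', rfl⟩
      have herlen : (avail.eraseIdx t').length = r := by
        rw [List.length_eraseIdx]; simp [ht']; omega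
      by_cases hcov : ld.getD (ld.length - 1) 0 ≤ ld.getD 0 0 + avail.getD t' 0
      · obtain ⟨p', hp'⟩ := exists_mem_permutations r (avail.eraseIdx t') herlen
        refine ⟨avail[t'] :: p', hmemof p' hp', ?_⟩
        rw [procA]
        simp only [← hgetD, if_pos hcov]
      · have hrec : dfsB (avail.take t' ++ avail.drop (t'+1))
            (ld.drop (advIdxB (ld.getD 0 0 + avail.getD t' 0) ld 0)) 0 = true := by
          rcases hbody with h | h
          · exact absurd h hcov
          · exact h
        have hlast : ld.getD 0 0 + avail.getD t' 0 < ld.getLast hld := by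
          rw [← getD_last_eq ld hld]; exact not_le.mp hcov
        have hne : dropCov (ld.getD 0 0 + avail.getD t' 0) ld ≠ [] :=
          dropCov_ne_nil _ ld hld hlast
        rw [← List.eraseIdx_eq_take_drop_succ, drop_advIdxB] at hrec
        obtain ⟨p', hp'mem, hp'proc⟩ :=
          (ih (avail.eraseIdx t') (dropCov (ld.getD 0 0 + avail.getD t' 0) ld) herlen hne).mp hrec
        refine ⟨avail[t'] :: p', hmemof p' hp'mem, ?_⟩
        rw [procA]
        simp only [← hgetD, if_neg hcov]
        rw [stepA_eq _ ld ⟨ld.getLast hld, List.getLast_mem hld, hlast⟩]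
        exact hp'proc
    · rintro ⟨ms, hmem, hproc⟩
      rw [PySem.List.permutations_succ] at hmem
      obtain ⟨i, hir, hmi⟩ := List.mem_flatMap.mp hmem
      have hi : i < avail.length := List.mem_range.mp hir
      rw [List.getElem?_eq_getElem hi] at hmi
      obtain ⟨p', hp'mem, hms⟩ := List.mem_map.mp hmi
      subst hms
      have hgetD : avail.getD i 0 = avail[i] := List.getD_eq_getElem avail 0 hi
      rw [procA] at hproc
      simp only [← hgetD] at hproc
      by_cases hcov : ld.getD (ld.length - 1) 0 ≤ ld.getD 0 0 + avail.getD i 0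
      · exact ⟨i, Nat.zero_le i, hi, Or.inl hcov⟩
      · refine ⟨i, Nat.zero_le i, hi, Or.inr ?_⟩
        rw [if_neg hcov] at hproc
        have hlast : ld.getD 0 0 + avail.getD i 0 < ld.getLast hld := by
          rw [← getD_last_eq ld hld]; exact not_le.mp hcov
        rw [stepA_eq _ ld ⟨ld.getLast hld, List.getLast_mem hld, hlast⟩] at hproc
        have hne : dropCov (ld.getD 0 0 + avail.getD i 0) ld ≠ [] :=
          dropCov_ne_nil _ ld hld hlast
        have herlen : (avail.eraseIdx i).length = r := by
          rw [List.length_eraseIdx]; simp [hi]; omega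
        have := (ih (avail.eraseIdx i) (dropCov (ld.getD 0 0 + avail.getD i 0) ld)
          herlen hne).mpr ⟨p', hp'mem, hproc⟩
        rw [← List.eraseIdx_eq_take_drop_succ, drop_advIdxB]
        exact this

lemma linDistA_length (n : Int) (weak : List Int) (i : Nat) (h : i ≤ weak.length) :
    (linDistA n weak i).length = weak.length := by
  simp [linDistA]; omega

lemma ldB_eq_linDistA (n : Int) (weak : List Int) (i : Nat) (h : i ≤ weak.length) :
    ldB n weak i = linDistA n weak i := by
  unfold ldB linDistA
  rw [PySem.List.slice_from_natCast, PySem.List.slice_to_natCast]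
  congr 1
  · apply List.ext_getElem
    · simp
    · intro k h1 h2
      simp only [List.getElem_drop, List.getElem_map, List.getElem_range', Nat.one_mul]
      rw [List.getD_eq_getElem]
  · apply List.ext_getElem
    · simp; omega
    · intro k h1 h2
      simp only [List.getElem_map, List.getElem_take, List.getElem_range]
      rw [List.getD_eq_getElem]

lemma ldB_ne_nil (n : Int) (weak : List Int) (i : Nat) (h : i < weak.length) :
    ldB n weak i ≠ [] := by
  rw [ldB_eq_linDistA n weak i (le_of_lt h)]
  apply List.ne_nil_of_length_pos
  rw [linDistA_length n weak i (le_of_lt h)]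
  omega

lemma inner_any_iff (n : Int) (weak pref : List Int) :
    ((PySem.List.permutations pref pref.length).any (fun ms => checkFixA n ms weak) = true) ↔
    ((List.range weak.length).any (fun i => dfsB pref (ldB n weak i) 0) = true) := by
  simp only [List.any_eq_true, List.mem_range]
  constructor
  · rintro ⟨ms, hms, hfix⟩
    unfold checkFixA at hfix
    simp only [List.any_eq_true, List.mem_range, List.isEmpty_iff] at hfix
    obtain ⟨i, hi, hemp⟩ := hfix
    refine ⟨i, hi, ?_⟩
    rw [dfsB_iff_perm pref.length pref (ldB n weak i) rfl (ldB_ne_nil n weak i hi)]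
    exact ⟨ms, hms, by rw [ldB_eq_linDistA n weak i (le_of_lt hi)]; exact hemp⟩
  · rintro ⟨i, hi, hdfs⟩
    rw [dfsB_iff_perm pref.length pref (ldB n weak i) rfl (ldB_ne_nil n weak i hi)] at hdfs
    obtain ⟨ms, hms, hproc⟩ := hdfs
    refine ⟨ms, hms, ?_⟩
    unfold checkFixA
    simp only [List.any_eq_true, List.mem_range, List.isEmpty_iff]
    exact ⟨i, hi, by rw [← ldB_eq_linDistA n weak i (le_of_lt hi)]; exact hproc⟩

lemma loop_eq (n : Int) (weak ds : List Int) : ∀ (c i : Nat), ds.length - i ≤ c →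
    aLoopA n weak ds i = bLoopB n weak ds (i+1) := by
  intro c
  induction c with
  | zero =>
    intro i hc
    rw [aLoopA, dif_neg (by omega), bLoopB, dif_neg (by omega)]
  | succ c ihc =>
    intro i hc
    by_cases hi : i < ds.length
    · rw [aLoopA, dif_pos hi, bLoopB, dif_pos (by omega)]
      have hpl : (ds.take (i+1)).length = i+1 := by
        rw [List.length_take]; omega
      by_cases hq : ((List.range weak.length).any
          (fun j => dfsB (ds.take (i+1)) (ldB n weak j) 0)) = true
      · have hA := (inner_any_iff n weak (ds.take (i+1))).mpr hq
        simp only [List.any_eq_true] at hA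
        obtain ⟨ms0, hms0, hfix0⟩ := hA
        have hsome : ((PySem.List.permutations (ds.take (i+1)) (ds.take (i+1)).length).find?
            (fun ms => checkFixA n ms weak)).isSome := by
          rw [List.find?_isSome]; exact ⟨ms0, hms0, hfix0⟩
        obtain ⟨ms, hfind⟩ := Option.isSome_iff_exists.mp hsome
        rw [hfind, if_pos hq]
        have hlen : ms.length = (ds.take (i+1)).length :=
          PySem.List.length_of_mem_permutations (List.mem_of_find?_eq_some hfind)
        show PySem.List.len ms = ((i+1 : Nat) : Int)
        rw [PySem.List.len_eq, hlen, hpl]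
      · have hA : ¬ ((PySem.List.permutations (ds.take (i+1)) (ds.take (i+1)).length).any
            (fun ms => checkFixA n ms weak)) = true := by
          intro hh; exact hq ((inner_any_iff n weak (ds.take (i+1))).mp hh)
        have hnone : ((PySem.List.permutations (ds.take (i+1)) (ds.take (i+1)).length).find?
            (fun ms => checkFixA n ms weak)) = none := by
          rw [List.find?_eq_none]
          intro ms hms hfix
          exact hA (by simp only [List.any_eq_true]; exact ⟨ms, hms, hfix⟩)
        rw [hnone, if_neg hq]
        exact ihc (i+1) (by omega)
    · rw [aLoopA, dif_neg hi, bLoopB, dif_neg (by omega)]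

-- ===== VERDICT (by name: the statement is the Claim_ definition above) =====
theorem solution_spec : Claim_equal_solution := by
  intro n weak dist _
  unfold Spec_solution solution solution_alt
  exact loop_eq n weak _ _ 0 (Nat.le_refl _)
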